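-- pv_equiv track=rewrite | github.com/unkn-s0urc3/Laboratory_tasks | count_homonyms/count_homonyms.py | count_homonyms
-- ===== SOURCE A (Python) =====
-- def count_homonyms(surnames):
--     surname_count = {}
--
--     for surname in surnames:
--         surname_count.setdefault(surname, 0)
--         surname_count[surname] += 1
--
--     total_homonyms = 0
--     for count in surname_count.values():
--         if count > 1:
--             total_homonyms += count
--
--     return total_homonyms
-- ===== SOURCE B (Python) =====
-- def count_homonyms(surnames):
--     # A person is a homonym iff their surname occurs more than once in the
--     # list; the answer is simply the number of such people.
--     total = 0
--     for surname in surnames: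
--         if surnames.count(surname) > 1:
--             total += 1
--     return total
-- ===== Notes on version B (the rewrite author's own statement) =====
-- stated objective: simpler
-- what changed: B drops the counter dictionary and the second pass over its values entirely: it counts people instead of names, adding 1 for each element whose surname occurs more than once (the sum of counts of repeated names equals the number of people bearing a repeated name).
import Mathlib
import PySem

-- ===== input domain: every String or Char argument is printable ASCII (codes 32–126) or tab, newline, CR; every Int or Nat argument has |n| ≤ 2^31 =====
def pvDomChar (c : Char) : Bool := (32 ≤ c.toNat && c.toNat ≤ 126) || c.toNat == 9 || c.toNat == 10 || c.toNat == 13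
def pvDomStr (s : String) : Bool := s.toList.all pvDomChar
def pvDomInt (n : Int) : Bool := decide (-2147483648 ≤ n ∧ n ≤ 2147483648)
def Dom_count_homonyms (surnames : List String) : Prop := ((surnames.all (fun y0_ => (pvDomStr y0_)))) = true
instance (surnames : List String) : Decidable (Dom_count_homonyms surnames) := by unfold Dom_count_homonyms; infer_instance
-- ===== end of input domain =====

-- B replaces A's counter dictionary + values pass by a single per-person count
-- (add 1 for each element whose surname occurs more than once); same value, no dict.

-- ===== PORT A =====
def count_homonyms (surnames : List String) : Int :=
  -- surname_count.setdefault(surname, 0); surname_count[surname] += 1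
  -- (after setdefault the key is present, so the read d[surname] is getD s 0)
  let surname_count : PySem.Dict String Int :=
    surnames.foldl (fun d s =>
      let d := d.setdefault s 0
      d.insert s (d.getD s 0 + 1)) PySem.Dict.empty
  surname_count.values.foldl (fun total c => if c > 1 then total + c else total) 0

-- ===== PORT B =====
def count_homonyms_alt (surnames : List String) : Int :=
  surnames.foldl (fun total s =>
    if (surnames.count s : Int) > 1 then total + 1 else total) 0

-- ===== PRECONDITION & SPEC =====
def Spec_count_homonyms (surnames : List String) (out : Int) : Prop := out = count_homonyms_alt surnames
instance (surnames : List String) (out : Int) : Decidable (Spec_count_homonyms surnames out) := by unfold Spec_count_homonyms; infer_instance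

-- ===== CLAIM (what is proved, stated in full; the proofs are below) =====
def Claim_equal_count_homonyms : Prop := ∀ (surnames : List String), Dom_count_homonyms surnames → Spec_count_homonyms surnames (count_homonyms surnames)

-- ===== LEMMAS AND PROOFS =====

-- A's loop body (setdefault then increment) is the standard counting insert.
theorem step_eq (d : PySem.Dict String Int) (s : String) :
    (let d' := d.setdefault s 0; d'.insert s (d'.getD s 0 + 1)) = d.insert s (d.getD s 0 + 1) := by
  by_cases h : d.contains s = true
  · simp [PySem.Dict.setdefault_of_contains d 0 h]
  · have h' : d.contains s = false := by simpa using h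
    simp [PySem.Dict.setdefault_of_not_contains d 0 h',
      PySem.Dict.getD_insert_self, PySem.Dict.insert_insert_self,
      PySem.Dict.getD_of_not_contains d 0 h']

-- countP of the elements of xs equal to k
theorem countP_filter_eq (p : String → Bool) (xs : List String) (k : String) :
    (xs.filter (fun x => x == k)).countP p = if p k then xs.count k else 0 := by
  induction xs with
  | nil => simp
  | cons x xs ih =>
    by_cases hx : x = k
    · subst hx
      simp only [List.filter_cons, List.count_cons, BEq.rfl, if_pos, List.countP_cons, ih]
      split <;> simp_all
    · have : (x == k) = false := by simpa using hx
      simp [this, ih, hx]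

-- Key lemma: summing (count if p) over distinct keys = counting elements satisfying p.
theorem sum_over_keys (p : String → Bool) :
    ∀ (ks xs : List String), ks.Nodup → (∀ x ∈ xs, x ∈ ks) →
    (ks.map (fun k => if p k then xs.count k else 0)).sum = xs.countP p := by
  intro ks
  induction ks with
  | nil =>
    intro xs _ hsub
    have : xs = [] := List.eq_nil_iff_forall_not_mem.2 (fun x hx => by simpa using hsub x hx)
    simp [this]
  | cons k ks ih =>
    intro xs hnd hsub
    have hk : k ∉ ks := (List.nodup_cons.1 hnd).1
    have hnd' : ks.Nodup := (List.nodup_cons.1 hnd).2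
    set xs' := xs.filter (fun x => !(x == k)) with hxs'
    have hsub' : ∀ x ∈ xs', x ∈ ks := by
      intro x hx
      have hmem := List.mem_of_mem_filter hx
      have hne : ¬(x == k) = true := by
        have := List.of_mem_filter hx; simpa using this
      rcases List.mem_cons.1 (hsub x hmem) with h | h
      · exact absurd (by simp [h]) hne
      · exact h
    have hcnt : ∀ k' ∈ ks, xs.count k' = xs'.count k' := by
      intro k' hk'
      have hne : k' ≠ k := fun h => hk (h ▸ hk')
      rw [hxs', List.count_filter]
      simp [hne]
    have hmap : (ks.map (fun k' => if p k' then xs.count k' else 0)).sum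
        = (ks.map (fun k' => if p k' then xs'.count k' else 0)).sum := by
      congr 1
      exact List.map_congr_left (fun k' hk' => by rw [hcnt k' hk'])
    have hsplit : xs.countP p
        = (xs.filter (fun x => x == k)).countP p + xs'.countP p := by
      rw [hxs']
      exact List.countP_eq_countP_filter_add xs p (fun x => x == k)
    simp only [List.map_cons, List.sum_cons, hmap, ih xs' hnd' hsub', hsplit,
      countP_filter_eq]

-- push the Nat→Int cast through the if-sum
theorem cast_ite_sum (xs ks : List String) :
    (ks.map (fun k => if (xs.count k : Int) > 1 then (xs.count k : Int) else 0)).sum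
      = ((ks.map (fun k => if 1 < xs.count k then xs.count k else 0)).sum : Int) := by
  induction ks with
  | nil => simp
  | cons k t ih =>
    simp only [List.map_cons, List.sum_cons, ih, Nat.cast_add]
    by_cases h : 1 < xs.count k
    · simp [h, show (1 : Int) < (xs.count k : Int) from by exact_mod_cast h]
    · simp [h, show ¬((1 : Int) < (xs.count k : Int)) from fun hc => h (by exact_mod_cast hc)]

-- sum of 1-per-satisfying-element equals countP
theorem sum_ite_one (xs l : List String) :
    (l.map (fun s => if (xs.count s : Int) > 1 then (1 : Int) else 0)).sum
      = (l.countP (fun s => decide (1 < xs.count s)) : Int) := by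
  induction l with
  | nil => simp
  | cons x t ih =>
    simp only [List.map_cons, List.sum_cons, List.countP_cons, ih]
    by_cases h : (1 : Int) < (xs.count x : Int)
    · have : 1 < xs.count x := by exact_mod_cast h
      simp [h, this]; ring
    · have : ¬ 1 < xs.count x := fun hc => h (by exact_mod_cast hc)
      simp [h, this]

-- ===== VERDICT (by name: the statement is the Claim_ definition above) =====
theorem count_homonyms_spec : Claim_equal_count_homonyms := by
  intro xs _
  unfold Spec_count_homonyms count_homonyms count_homonyms_alt
  -- A's dict loop is the canonical counter
  have hdict : xs.foldl (fun d s =>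
      let d' := d.setdefault s 0
      d'.insert s (d'.getD s 0 + 1)) PySem.Dict.empty = PySem.Dict.counter xs := by
    rw [← PySem.Dict.foldl_insert_getD_add_one_eq_counter]
    congr 1
    funext d s
    exact step_eq d s
  simp only [hdict]
  -- values of the counter: counts of the distinct surnames, in first-occurrence order
  have hvals : (PySem.Dict.counter xs).values
      = (PySem.Set.ofList xs).map (fun k => (xs.count k : Int)) := by
    show (PySem.Dict.counter xs).items.map (·.2) = _
    rw [PySem.Dict.items_counter]
    simp
  rw [hvals]
  -- turn both accumulating folds into sums
  have hfoldA : ∀ (l : List Int) (a : Int),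
      l.foldl (fun total c => if c > 1 then total + c else total) a
        = a + (l.map (fun c => if c > 1 then c else 0)).sum := by
    intro l
    induction l with
    | nil => simp
    | cons c t ih => intro a; simp only [List.foldl_cons, List.map_cons, List.sum_cons, ih]; split <;> ring
  have hfoldB : ∀ (l : List String) (a : Int),
      l.foldl (fun total s => if (xs.count s : Int) > 1 then total + 1 else total) a
        = a + (l.map (fun s => if (xs.count s : Int) > 1 then (1 : Int) else 0)).sum := by
    intro l
    induction l with
    | nil => simp
    | cons c t ih => intro a; simp only [List.foldl_cons, List.map_cons, List.sum_cons, ih]; split <;> ring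
  rw [hfoldA, hfoldB, List.map_map]
  simp only [Function.comp_def]
  rw [cast_ite_sum xs (PySem.Set.ofList xs), sum_ite_one xs xs, zero_add, zero_add, Nat.cast_inj]
  calc ((PySem.Set.ofList xs).map (fun k => if 1 < xs.count k then xs.count k else 0)).sum
      = ((PySem.Set.ofList xs).map (fun k => if (fun s => decide (1 < xs.count s)) k then xs.count k else 0)).sum := by
        simp
    _ = xs.countP (fun s => decide (1 < xs.count s)) :=
        sum_over_keys _ _ xs (PySem.Set.nodup_ofList xs) (fun x hx => (PySem.Set.mem_ofList xs x).2 hx)
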